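-- pv_equiv track=rewrite | github.com/Hatoms/IA_Wordle | main.py | return_combinaison
-- ===== SOURCE A (Python) =====
-- def return_combinaison(word, answer):
--     combi = []
--     for ind, letter in enumerate(word):
--         if letter == answer[ind]:
--             combi.append(2)
--             continue
--         letter_in_answers = [i for i,l in enumerate(answer) if l==letter]
--         if not letter_in_answers:
--             combi.append(0)
--             continue
--         same_letter = [i for i,l in enumerate(word) if i!= ind and l==letter]
--         if not same_letter:
--             combi.append(1)
--             continue
--
--         up = set([i for i in same_letter if i<ind])-(set(letter_in_answers).intersection(set(same_letter)))
--         down = set(letter_in_answers)-set(letter_in_answers).intersection(set(same_letter))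
--         if len(down)-len(up) >0:
--             combi.append(1)
--         else:
--             combi.append(0)
--     return combi
-- ===== SOURCE B (Python) =====
-- def return_combinaison(word, answer):
--     # one counter of the answer's letters, a green pass, then a left-to-right yellow pass
--     cnt = {}
--     for c in answer:
--         cnt[c] = cnt.get(c, 0) + 1
--     greens = []
--     for i, c in enumerate(word):
--         g = c == answer[i]
--         greens.append(g)
--         if g:
--             cnt[c] = cnt.get(c, 0) - 1
--     res = []
--     for g, c in zip(greens, word):
--         if g:
--             res.append(2)
--         elif cnt.get(c, 0) > 0:
--             res.append(1)
--             cnt[c] = cnt.get(c, 0) - 1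
--         else:
--             res.append(0)
--     return res
-- ===== Notes on version B (the rewrite author's own statement) =====
-- stated objective: faster
-- what changed: Replaces A's per-position index-list and set-difference machinery (rebuilding letter-position lists of word and answer and up/down set arithmetic for every letter) by the standard Wordle algorithm: one letter counter over the answer, a green pass that consumes counts, and a left-to-right yellow pass.
import Mathlib
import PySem

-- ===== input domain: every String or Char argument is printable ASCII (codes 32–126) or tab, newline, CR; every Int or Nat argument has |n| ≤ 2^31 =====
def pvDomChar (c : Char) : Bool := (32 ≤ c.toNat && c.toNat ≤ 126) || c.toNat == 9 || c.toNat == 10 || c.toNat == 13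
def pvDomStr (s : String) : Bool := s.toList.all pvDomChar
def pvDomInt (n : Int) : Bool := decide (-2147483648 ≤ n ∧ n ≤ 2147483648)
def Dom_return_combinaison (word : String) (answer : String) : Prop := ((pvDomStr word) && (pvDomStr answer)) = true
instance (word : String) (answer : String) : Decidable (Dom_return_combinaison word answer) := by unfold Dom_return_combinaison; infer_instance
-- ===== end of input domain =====

-- B replaces A's per-position index-list/set-difference machinery by one answer-letter counter,
-- a green pass and a left-to-right yellow pass (a different, linear-pass algorithm).


-- ===== PORT A =====
def return_combinaison (word : String) (answer : String) : List Int :=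
  let wl := word.toList
  let al := answer.toList
  (PySem.List.enumerate wl 0).foldl (fun combi p =>
    let ind := p.1
    let letter := p.2
    match PySem.List.pyGet? al ind with
    | none => combi  -- Python raises IndexError here; excluded by Pre_
    | some ch =>
      if letter == ch then combi ++ [2]
      else
        let lia : List Int := ((PySem.List.enumerate al 0).filter (fun q => q.2 == letter)).map (·.1)
        if lia = [] then combi ++ [0]
        else
          let sl : List Int := ((PySem.List.enumerate wl 0).filter (fun q => q.1 != ind && q.2 == letter)).map (·.1)
          if sl = [] then combi ++ [1]
          else
            let inter := PySem.Set.inter (PySem.Set.ofList lia) (PySem.Set.ofList sl)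
            let up := PySem.Set.diff (PySem.Set.ofList (sl.filter (fun i => i < ind))) inter
            let down := PySem.Set.diff (PySem.Set.ofList lia) inter
            if PySem.Set.len down - PySem.Set.len up > 0 then combi ++ [1] else combi ++ [0]) []

-- ===== PORT B =====
def return_combinaison_alt (word : String) (answer : String) : List Int :=
  let wl := word.toList
  let al := answer.toList
  -- cnt = {}; for c in answer: cnt[c] = cnt.get(c, 0) + 1
  let cnt0 : PySem.Dict Char Int := al.foldl (fun d c => d.insert c (d.getD c 0 + 1)) PySem.Dict.empty
  -- greens = []; for i, c in enumerate(word): g = c == answer[i]; greens.append(g); if g: cnt[c] -= 1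
  let s1 := (PySem.List.enumerate wl 0).foldl
    (fun (st : List Bool × PySem.Dict Char Int) p =>
      match PySem.List.pyGet? al p.1 with
      | none => st  -- Python raises IndexError here; excluded by Pre_
      | some ch =>
        let g := p.2 == ch
        (st.1 ++ [g], if g then st.2.insert p.2 (st.2.getD p.2 0 - 1) else st.2)) ([], cnt0)
  -- res = []; for g, c in zip(greens, word): ...
  let s2 := (s1.1.zip wl).foldl
    (fun (st : PySem.Dict Char Int × List Int) q =>
      if q.1 then (st.1, st.2 ++ [2])
      else if st.1.getD q.2 0 > 0 then (st.1.insert q.2 (st.1.getD q.2 0 - 1), st.2 ++ [1])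
      else (st.1, st.2 ++ [0])) (s1.2, [])
  s2.2

-- ===== PRECONDITION & SPEC =====
-- Pre_: A reads answer[ind] at every index of word, so it raises IndexError iff len(word) > len(answer);
-- those inputs (and only those) are excluded.
def Pre_return_combinaison (word : String) (answer : String) : Prop :=
  word.toList.length ≤ answer.toList.length
instance (word : String) (answer : String) : Decidable (Pre_return_combinaison word answer) := by
  unfold Pre_return_combinaison; infer_instance

def pvWitness_return_combinaison : String × String := ("abba", "baab")

def Spec_return_combinaison (word : String) (answer : String) (out : List Int) : Prop := out = return_combinaison_alt word answer
instance (word : String) (answer : String) (out : List Int) : Decidable (Spec_return_combinaison word answer out) := by unfold Spec_return_combinaison; infer_instance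

-- ===== CLAIM (what is proved, stated in full; the proofs are below) =====
def Claim_equal_return_combinaison : Prop := ∀ (word : String) (answer : String), Dom_return_combinaison word answer → Pre_return_combinaison word answer → Spec_return_combinaison word answer (return_combinaison word answer)

-- ===== LEMMAS AND PROOFS =====
-- Throughout, z = wl.zip al; pvG c counts green positions holding c, pvE k c counts non-green
-- positions < k holding c, and pvVal is the common per-position value both ports produce.

lemma pv_countP_enumerate {α : Type} (l : List α) (pr : α → Bool) :
    ∀ s : Int, ((PySem.List.enumerate l s).countP (fun q => pr q.2)) = l.countP pr := by
  induction l with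
  | nil => intro s; simp [PySem.List.enumerate_nil]
  | cons x xs ih => intro s; simp [PySem.List.enumerate_cons, List.countP_cons, ih]

lemma pv_mem_idx {α : Type} (l : List α) (pred : Int × α → Bool) (j : Int) :
    j ∈ (((PySem.List.enumerate l 0).filter pred).map (·.1)) ↔
      ∃ (n : Nat) (hn : n < l.length), j = (n : Int) ∧ pred ((n : Int), l[n]) = true := by
  simp only [List.mem_map, List.mem_filter, PySem.List.mem_enumerate_iff]
  constructor
  · rintro ⟨p, ⟨⟨n, hn, rfl⟩, hp⟩, rfl⟩
    exact ⟨n, hn, by simp, by simpa using hp⟩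
  · rintro ⟨n, hn, rfl, hp⟩
    exact ⟨((n : Int), l[n]), ⟨⟨n, hn, by simp⟩, hp⟩, rfl⟩

lemma pv_nodup_idx {α : Type} (l : List α) (pred : Int × α → Bool) :
    (((PySem.List.enumerate l 0).filter pred).map (·.1)).Nodup := by
  have h1 := PySem.List.pairwise_lt_enumerate l 0
  have h2 := h1.filter pred
  have h3 : (((PySem.List.enumerate l 0).filter pred).map (·.1)).Pairwise (· < ·) := by
    rw [List.pairwise_map]; exact h2
  exact (h3.imp fun h => ne_of_lt h)

lemma pv_len_idx {α : Type} (l : List α) (pred : Int × α → Bool) :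
    (((PySem.List.enumerate l 0).filter pred).map (·.1)).length
      = (PySem.List.enumerate l 0).countP pred := by
  rw [List.length_map]; exact Eq.symm List.countP_eq_length_filter


lemma pv_counter_getD (al : List Char) :
    ∀ (d : PySem.Dict Char Int) (c : Char),
      (al.foldl (fun d c => d.insert c (d.getD c 0 + 1)) d).getD c 0 = d.getD c 0 + al.count c := by
  induction al with
  | nil => intro d c; simp
  | cons x xs ih =>
    intro d c
    simp only [List.foldl_cons, ih, PySem.Dict.getD_insert, List.count_cons]
    by_cases h : c = x
    · subst h; simp; omega
    · simp [h, Ne.symm h]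

lemma pv_enumFold {σ : Type} (al : List Char) (f : σ → Char → Char → σ) :
    ∀ (wl : List Char) (s : Nat), s + wl.length ≤ al.length → ∀ (init : σ),
      ((PySem.List.enumerate wl (s : Int)).foldl (fun st p =>
          match PySem.List.pyGet? al p.1 with
          | none => st
          | some ch => f st p.2 ch) init)
      = (wl.zip (al.drop s)).foldl (fun st q => f st q.1 q.2) init := by
  intro wl
  induction wl with
  | nil => intro s h init; simp [PySem.List.enumerate_nil]
  | cons x xs ih =>
    intro s h init
    have hs : s < al.length := by simp at h; omega
    have hdrop : al.drop s = al[s] :: al.drop (s + 1) := List.drop_eq_getElem_cons hs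
    have hget : PySem.List.pyGet? al (s : Int) = some al[s] := by
      rw [PySem.List.pyGet?_natCast]
      exact List.getElem?_eq_getElem hs
    rw [PySem.List.enumerate_cons, hdrop]
    simp only [List.foldl_cons, List.zip_cons_cons, hget]
    have hcast : ((s : Int) + 1) = ((s + 1 : Nat) : Int) := by push_cast; ring
    rw [hcast, ih (s + 1) (by simp at h ⊢; omega)]

lemma pv_decFold (z : List (Char × Char)) :
    ∀ (d : PySem.Dict Char Int) (c : Char),
      (z.foldl (fun d q => if q.1 == q.2 then d.insert q.1 (d.getD q.1 0 - 1) else d) d).getD c 0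
        = d.getD c 0 - (z.countP (fun q => q.1 == c && q.2 == c) : Int) := by
  induction z with
  | nil => intro d c; simp
  | cons q z ih =>
    intro d c
    obtain ⟨a, b⟩ := q
    simp only [List.foldl_cons, List.countP_cons]
    by_cases hg : a = b
    · subst hg
      simp only [beq_self_eq_true, if_true, ih, PySem.Dict.getD_insert]
      by_cases hc : c = a
      · subst hc; simp; omega
      · have h1 : ((a == c && a == c)) = false := by
          have : ¬ a = c := fun h => hc h.symm
          simp [this]
        simp [hc]
        exact fun h => hc h.symm
    · have h0 : (a == b) = false := by simp [hg]
      have h1 : ((a == c && b == c)) = false := by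
        by_cases hac : a = c
        · have : ¬ b = c := fun hb => hg (hac.trans hb.symm); simp [this]
        · simp [hac]
      simp only [h0, Bool.false_eq_true, if_false, h1, Nat.add_zero]
      exact ih d c

lemma pv_G_le (wl al : List Char) (c : Char) :
    ((wl.zip al).countP (fun q => q.1 == c && q.2 == c)) ≤ al.count c := by
  induction wl generalizing al with
  | nil => simp
  | cons x xs ih =>
    cases al with
    | nil => simp
    | cons y ys =>
      simp only [List.zip_cons_cons, List.countP_cons, List.count_cons]
      have hih := ih ys
      by_cases hy : y = c
      · by_cases hx : x = c <;> simp [hx, hy] <;> omega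
      · have h1 : ((x == c && y == c)) = false := by simp [hy]
        simp [h1, hy]; omega

def pvG (z : List (Char × Char)) (c : Char) : Nat := z.countP (fun q => q.1 == c && q.2 == c)
def pvE (z : List (Char × Char)) (k : Nat) (c : Char) : Nat :=
  (z.take k).countP (fun q => q.1 == c && q.2 != c)
def pvVal (al : List Char) (z : List (Char × Char)) (k : Nat) : Int :=
  let p := z.getD k ('A', 'A')
  if p.1 == p.2 then 2
  else if (al.count p.1 : Int) - pvG z p.1 > pvE z k p.1 then 1 else 0

lemma pv_pass2 (al : List Char) (z : List (Char × Char)) :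
    ∀ (n k : Nat), n = z.length - k → k ≤ z.length →
    ∀ (d : PySem.Dict Char Int) (res : List Int),
      (∀ c, d.getD c 0 = max ((al.count c : Int) - pvG z c - pvE z k c) 0) →
      (((z.drop k).foldl (fun (st : PySem.Dict Char Int × List Int) q =>
          if q.1 == q.2 then (st.1, st.2 ++ [2])
          else if st.1.getD q.1 0 > 0 then (st.1.insert q.1 (st.1.getD q.1 0 - 1), st.2 ++ [1])
          else (st.1, st.2 ++ [0])) (d, res)).2)
        = res ++ (List.range' k (z.length - k)).map (pvVal al z) := by
  intro n
  induction n with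
  | zero =>
    intro k hn hk d res hinv
    have : z.length = k := by omega
    rw [List.drop_of_length_le (by omega), this]
    simp
  | succ m ih =>
    intro k hn hk d res hinv
    have hklt : k < z.length := by omega
    have hdrop : z.drop k = z[k] :: z.drop (k + 1) := List.drop_eq_getElem_cons hklt
    have hrange : List.range' k (z.length - k) = k :: List.range' (k + 1) (z.length - (k + 1)) := by
      have : z.length - k = (z.length - (k + 1)) + 1 := by omega
      rw [this, List.range'_succ]
    have hget : z.getD k ('A','A') = z[k] := List.getD_eq_getElem z ('A','A') hklt
    have htake : z.take (k + 1) = z.take k ++ [z[k]] := by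
      rw [List.take_add_one, List.getElem?_eq_getElem hklt]; rfl
    have hEsucc : ∀ c, pvE z (k + 1) c
        = pvE z k c + (if (z[k].1 == c && z[k].2 != c) then 1 else 0) := by
      intro c; unfold pvE; rw [htake, List.countP_append]; simp
    rw [hdrop, hrange]
    simp only [List.foldl_cons, List.map_cons]
    by_cases hg : z[k].1 = z[k].2
    · -- green position: value 2, state unchanged
      have hv : pvVal al z k = 2 := by unfold pvVal; rw [hget]; simp [hg]
      simp only [hg, beq_self_eq_true, if_true]
      rw [ih (k + 1) (by omega) (by omega) d (res ++ [2]) ?_, hv]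
      · simp
      · intro c
        rw [hinv c, hEsucc c]
        have : (z[k].1 == c && z[k].2 != c) = false := by
          by_cases hc : z[k].1 = c
          · have : z[k].2 = c := hg ▸ hc
            simp [this]
          · simp [hc]
        simp [this]
    · have hgb : (z[k].1 == z[k].2) = false := by simp [hg]
      have hE1 : pvE z (k + 1) z[k].1 = pvE z k z[k].1 + 1 := by
        rw [hEsucc]; have : z[k].2 ≠ z[k].1 := fun h => hg h.symm; simp [this]
      have hEo : ∀ c, c ≠ z[k].1 → pvE z (k + 1) c = pvE z k c := by
        intro c hc
        rw [hEsucc]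
        have : (z[k].1 == c) = false := by
          simp only [beq_eq_false_iff_ne, ne_eq]
          exact fun h => hc h.symm
        simp [this]
      simp only [hgb, Bool.false_eq_true, if_false]
      by_cases hpos : d.getD z[k].1 0 > 0
      · -- yellow
        have hcond : (al.count z[k].1 : Int) - pvG z z[k].1 > pvE z k z[k].1 := by
          have := hinv z[k].1; omega
        have hv : pvVal al z k = 1 := by
          unfold pvVal; rw [hget]; simp only [hgb, Bool.false_eq_true, if_false]
          rw [if_pos hcond]
        simp only [hpos, if_true]
        rw [ih (k + 1) (by omega) (by omega) _ (res ++ [1]) ?_, hv]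
        · simp
        · intro c
          rw [PySem.Dict.getD_insert]
          by_cases hc : c = z[k].1
          · subst hc
            rw [if_pos rfl, hinv z[k].1, hE1]
            have h1 := hinv z[k].1
            omega
          · rw [if_neg hc, hinv c, hEo c hc]
      · -- gray
        have hcond : ¬ ((al.count z[k].1 : Int) - pvG z z[k].1 > pvE z k z[k].1) := by
          have := hinv z[k].1; omega
        have hv : pvVal al z k = 0 := by
          unfold pvVal; rw [hget]; simp only [hgb, Bool.false_eq_true, if_false]
          rw [if_neg hcond]
        simp only [hpos, if_false]
        rw [ih (k + 1) (by omega) (by omega) d (res ++ [0]) ?_, hv]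
        · simp
        · intro c
          by_cases hc : c = z[k].1
          · subst hc
            rw [hinv z[k].1, hE1]
            omega
          · rw [hinv c, hEo c hc]

lemma pv_portB (word answer : String) (h : word.toList.length ≤ answer.toList.length) :
    return_combinaison_alt word answer
      = (List.range word.toList.length).map (fun k => pvVal answer.toList (word.toList.zip answer.toList) k) := by
  unfold return_combinaison_alt
  set wl := word.toList with hwl
  set al := answer.toList with hal
  set z := wl.zip al with hz
  have hzl : z.length = wl.length := by
    rw [hz, List.length_zip]; omega
  -- first loop over enumerate(word) = loop over zip(word, answer)
  have e0 := pv_enumFold al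
      (fun (st : List Bool × PySem.Dict Char Int) (c ch : Char) =>
        (st.1 ++ [c == ch], if c == ch then st.2.insert c (st.2.getD c 0 - 1) else st.2))
      wl 0 (by omega)
      (([] : List Bool), al.foldl (fun d c => d.insert c (d.getD c 0 + 1)) PySem.Dict.empty)
  simp only [Nat.cast_zero, List.drop_zero] at e0
  simp only []
  rw [e0]
  rw [PySem.List.foldl_prod_mk
        (f := fun (l : List Bool) (q : Char × Char) => l ++ [q.1 == q.2])
        (g := fun (d : PySem.Dict Char Int) (q : Char × Char) =>
          if q.1 == q.2 then d.insert q.1 (d.getD q.1 0 - 1) else d)]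
  rw [PySem.List.foldl_append_singleton_eq_map (fun (q : Char × Char) => q.1 == q.2) z []]
  simp only [List.nil_append]
  -- second loop: zip(greens, word) is a map over z
  have hfst : wl = z.map Prod.fst := (List.map_fst_zip h).symm
  rw [show (List.map (fun (q : Char × Char) => q.1 == q.2) z).zip wl
        = z.map (fun q => ((q.1 == q.2 : Bool), q.1)) by
      conv_lhs => rw [hfst]
      exact List.zip_map']
  rw [List.foldl_map]
  have hstep : (fun (st : PySem.Dict Char Int × List Int) (q : Char × Char) =>
      if (q.1 == q.2 : Bool) then (st.1, st.2 ++ [2])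
      else if st.1.getD q.1 0 > 0 then (st.1.insert q.1 (st.1.getD q.1 0 - 1), st.2 ++ [1])
      else (st.1, st.2 ++ [0]))
      = (fun (st : PySem.Dict Char Int × List Int) q =>
          if q.1 == q.2 then (st.1, st.2 ++ [2])
          else if st.1.getD q.1 0 > 0 then (st.1.insert q.1 (st.1.getD q.1 0 - 1), st.2 ++ [1])
          else (st.1, st.2 ++ [0])) := rfl
  have hp2 := pv_pass2 al z z.length 0 (by omega) (by omega)
      (z.foldl (fun (d : PySem.Dict Char Int) (q : Char × Char) =>
          if q.1 == q.2 then d.insert q.1 (d.getD q.1 0 - 1) else d)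
        (al.foldl (fun d c => d.insert c (d.getD c 0 + 1)) PySem.Dict.empty))
      []
      (by
        intro c
        rw [pv_decFold, pv_counter_getD]
        have hg := pv_G_le wl al c
        rw [← hz] at hg
        have he : (PySem.Dict.empty : PySem.Dict Char Int).getD c 0 = 0 := by simp
        rw [he]
        unfold pvG pvE
        simp only [List.take_zero, List.countP_nil]
        omega)
  simp only [List.drop_zero, List.nil_append, Nat.sub_zero] at hp2
  rw [hp2, hzl, List.range_eq_range']

def pvBodyA (wl al : List Char) (ind : Int) (letter ch : Char) : Int :=
  if letter == ch then 2
  else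
    let lia : List Int := ((PySem.List.enumerate al 0).filter (fun q => q.2 == letter)).map (·.1)
    if lia = [] then 0
    else
      let sl : List Int := ((PySem.List.enumerate wl 0).filter (fun q => q.1 != ind && q.2 == letter)).map (·.1)
      if sl = [] then 1
      else
        let inter := PySem.Set.inter (PySem.Set.ofList lia) (PySem.Set.ofList sl)
        let up := PySem.Set.diff (PySem.Set.ofList (sl.filter (fun i => i < ind))) inter
        let down := PySem.Set.diff (PySem.Set.ofList lia) inter
        if PySem.Set.len down - PySem.Set.len up > 0 then 1 else 0

lemma pv_bodyA_eq (wl al : List Char) (h : wl.length ≤ al.length) (k : Nat) (hk : k < wl.length) :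
    pvBodyA wl al (k : Int) wl[k] (al[k]'(lt_of_lt_of_le hk h)) = pvVal al (wl.zip al) k := by
  have hka : k < al.length := lt_of_lt_of_le hk h
  set z := wl.zip al with hz
  have hzl : z.length = wl.length := by rw [hz, List.length_zip]; omega
  have hkz : k < z.length := by omega
  have hzk : z[k] = (wl[k], al[k]'hka) := by simp [hz, List.getElem_zip]
  have hget : z[k]? = some (wl[k], al[k]'hka) := by
    rw [List.getElem?_eq_getElem hkz, hzk]
  have hzn : ∀ (n : Nat) (hn : n < z.length), z[n] = (wl[n]'(by omega), al[n]'(by omega)) := by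
    intro n hn; simp [hz, List.getElem_zip]
  by_cases hgreen : wl[k] = al[k]'hka
  · simp [pvBodyA, pvVal, hget, hgreen]
  · have hgb : (wl[k] == al[k]'hka) = false := by simp [hgreen]
    simp only [pvBodyA, pvVal, hgb, Bool.false_eq_true, if_false]
    -- abbreviations
    set c := wl[k] with hc
    set lia := ((PySem.List.enumerate al 0).filter (fun q => q.2 == c)).map (·.1) with hlia
    set sl := ((PySem.List.enumerate wl 0).filter (fun q => q.1 != (k : Int) && q.2 == c)).map (·.1) with hsl
    have hliaLen : lia.length = al.count c := by
      rw [hlia, pv_len_idx]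
      rw [List.count_eq_countP]
      exact pv_countP_enumerate al (fun x => x == c) 0
    have hmemlia : ∀ j : Int, j ∈ lia ↔ ∃ (n : Nat) (hn : n < al.length), j = (n : Int) ∧ al[n] = c := by
      intro j
      rw [hlia, pv_mem_idx]
      constructor
      · rintro ⟨n, hn, rfl, hp⟩; exact ⟨n, hn, rfl, by simpa using hp⟩
      · rintro ⟨n, hn, rfl, hp⟩; exact ⟨n, hn, rfl, by simpa using hp⟩
    have hmemsl : ∀ j : Int, j ∈ sl ↔ ∃ (n : Nat) (hn : n < wl.length), j = (n : Int) ∧ n ≠ k ∧ wl[n] = c := by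
      intro j
      rw [hsl, pv_mem_idx]
      constructor
      · rintro ⟨n, hn, rfl, hp⟩
        simp only [bne_iff_ne, ne_eq, Bool.and_eq_true, beq_iff_eq] at hp
        exact ⟨n, hn, rfl, by exact_mod_cast hp.1, hp.2⟩
      · rintro ⟨n, hn, rfl, hne, hp⟩
        refine ⟨n, hn, rfl, ?_⟩
        simp only [bne_iff_ne, ne_eq, Bool.and_eq_true, beq_iff_eq]
        exact ⟨by exact_mod_cast hne, hp⟩
    by_cases hl : lia = []
    · -- letter absent from answer: A appends 0; count = 0 so the counter condition is false
      have hcnt : al.count c = 0 := by rw [← hliaLen, hl]; rfl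
      have hGle := pv_G_le wl al c
      rw [← hz] at hGle
      have : ¬ ((al.count c : Int) - pvG z c > pvE z k c) := by
        unfold pvG
        omega
      simp [hl, hget, hgreen, this]
    · by_cases hs : sl = []
      · -- sole occurrence in word: A appends 1; G = E = 0 and count ≥ 1
        have hcnt : 0 < al.count c := by
          rw [← hliaLen]
          rcases List.length_pos_iff.2 hl with hp
          exact hp
        have hG0 : pvG z c = 0 := by
          unfold pvG
          rw [List.countP_eq_zero]
          rintro q hq hpq
          simp only [Bool.and_eq_true, beq_iff_eq] at hpq
          rcases List.mem_iff_getElem.1 hq with ⟨n, hn, rfl⟩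
          rw [hzn n hn] at hpq
          have hnk : n ≠ k := by
            intro he; subst he
            exact hgreen (hpq.1.trans hpq.2.symm)
          have hmem : ((n : Int)) ∈ sl := (hmemsl (n : Int)).2 ⟨n, by omega, rfl, hnk, hpq.1⟩
          rw [hs] at hmem
          exact List.not_mem_nil hmem
        have hE0 : pvE z k c = 0 := by
          unfold pvE
          rw [List.countP_eq_zero]
          rintro q hq hpq
          simp only [Bool.and_eq_true, beq_iff_eq, bne_iff_ne, ne_eq] at hpq
          rcases List.mem_iff_getElem.1 hq with ⟨n, hn, rfl⟩
          have hnk : n < k := by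
            have := hn; simp [List.length_take] at this; omega
          have hnz : n < z.length := by omega
          rw [List.getElem_take, hzn n hnz] at hpq
          have hmem : ((n : Int)) ∈ sl := (hmemsl (n : Int)).2 ⟨n, by omega, rfl, by omega, hpq.1⟩
          rw [hs] at hmem
          exact List.not_mem_nil hmem
        have hcond : ((al.count c : Int) - pvG z c > pvE z k c) := by
          rw [hG0, hE0]; push_cast; omega
        simp [hl, hs, hget, hgreen, hcond]
      · -- duplicate letter: compare |down| = count - G with |up| = E
        have ndlia : lia.Nodup := by rw [hlia]; exact pv_nodup_idx al _
        have ndsl : sl.Nodup := by rw [hsl]; exact pv_nodup_idx wl _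
        have hofl : PySem.Set.ofList lia = lia := PySem.Set.ofList_eq_self_of_nodup lia ndlia
        have hofs : PySem.Set.ofList sl = sl := PySem.Set.ofList_eq_self_of_nodup sl ndsl
        set S := PySem.Set.inter (PySem.Set.ofList lia) (PySem.Set.ofList sl) with hS
        have hmeminter : ∀ j : Int,
            j ∈ S ↔ j ∈ lia ∧ j ∈ sl := by
          intro j
          rw [hS, hofl, hofs]
          simp [PySem.Set.inter, PySem.Set.contains, List.mem_filter]
        have ndinter : (S).Nodup := by
          rw [hS, hofl]; exact ndlia.filter _
        -- |inter| = pvG z c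
        have hGlen : ((((PySem.List.enumerate z 0).filter (fun q => q.2.1 == c && q.2.2 == c)).map (·.1)).length) = pvG z c := by
          rw [pv_len_idx]
          exact pv_countP_enumerate z (fun p => p.1 == c && p.2 == c) 0
        have hmemGl : ∀ j : Int,
            j ∈ (((PySem.List.enumerate z 0).filter (fun q => q.2.1 == c && q.2.2 == c)).map (·.1)) ↔
              ∃ (n : Nat) (hn : n < z.length), j = (n : Int) ∧ wl[n]'(by omega) = c ∧ al[n]'(by omega) = c := by
          intro j
          rw [pv_mem_idx]
          constructor
          · rintro ⟨n, hn, rfl, hp⟩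
            rw [hzn n hn] at hp
            simp only [Bool.and_eq_true, beq_iff_eq] at hp
            exact ⟨n, hn, rfl, hp.1, hp.2⟩
          · rintro ⟨n, hn, rfl, h1, h2⟩
            refine ⟨n, hn, rfl, ?_⟩
            rw [hzn n hn]
            simp only [Bool.and_eq_true, beq_iff_eq]
            exact ⟨h1, h2⟩
        have hinterlen : (S).length = pvG z c := by
          rw [← hGlen]
          refine List.Perm.length_eq ?_
          refine (List.perm_ext_iff_of_nodup ndinter (pv_nodup_idx z _)).2 ?_
          intro j
          rw [hmeminter j, hmemGl j, hmemlia j, hmemsl j]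
          constructor
          · rintro ⟨⟨n1, hn1, rfl, ha⟩, ⟨n2, hn2, he, hnk, hw⟩⟩
            have : n2 = n1 := by exact_mod_cast he.symm
            subst this
            exact ⟨n2, by omega, rfl, hw, ha⟩
          · rintro ⟨n, hn, rfl, hw, ha⟩
            have hnk : n ≠ k := by
              intro he; subst he
              exact hgreen ha.symm
            exact ⟨⟨n, by omega, rfl, ha⟩, ⟨n, by omega, rfl, hnk, hw⟩⟩
        -- |up| = pvE z k c
        have ndupf : ((sl.filter (fun i => decide (i < (k : Int))))).Nodup := ndsl.filter _
        have hofu : PySem.Set.ofList (sl.filter (fun i => decide (i < (k : Int))))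
            = sl.filter (fun i => decide (i < (k : Int))) :=
          PySem.Set.ofList_eq_self_of_nodup _ ndupf
        have hElen : ((((PySem.List.enumerate (z.take k) 0).filter (fun q => q.2.1 == c && q.2.2 != c)).map (·.1)).length) = pvE z k c := by
          rw [pv_len_idx]
          exact pv_countP_enumerate (z.take k) (fun p => p.1 == c && p.2 != c) 0
        have htklen : (z.take k).length = k := by simp [List.length_take]; omega
        have hmemEl : ∀ j : Int,
            j ∈ (((PySem.List.enumerate (z.take k) 0).filter (fun q => q.2.1 == c && q.2.2 != c)).map (·.1)) ↔
              ∃ (n : Nat) (hn : n < k), j = (n : Int) ∧ wl[n]'(by omega) = c ∧ ¬ al[n]'(by omega) = c := by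
          intro j
          rw [pv_mem_idx]
          constructor
          · rintro ⟨n, hn, rfl, hp⟩
            have hnk : n < k := by rw [htklen] at hn; exact hn
            have hnz : n < z.length := by omega
            rw [List.getElem_take, hzn n hnz] at hp
            simp only [Bool.and_eq_true, beq_iff_eq, bne_iff_ne, ne_eq] at hp
            exact ⟨n, hnk, rfl, hp.1, hp.2⟩
          · rintro ⟨n, hnk, rfl, h1, h2⟩
            have hn : n < (z.take k).length := by rw [htklen]; exact hnk
            refine ⟨n, hn, rfl, ?_⟩
            rw [List.getElem_take, hzn n (by omega)]
            simp only [Bool.and_eq_true, beq_iff_eq, bne_iff_ne, ne_eq]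
            exact ⟨h1, h2⟩
        have hmemup : ∀ j : Int,
            j ∈ PySem.Set.diff (PySem.Set.ofList (sl.filter (fun i => decide (i < (k : Int)))))
                  (S)
              ↔ (j ∈ sl ∧ j < (k : Int) ∧ ¬ j ∈ lia) := by
          intro j
          rw [hofu]
          constructor
          · intro hj
            simp only [PySem.Set.diff, List.mem_filter, Bool.not_eq_true', decide_eq_true_eq] at hj
            obtain ⟨⟨hjs, hjk⟩, hnc⟩ := hj
            refine ⟨hjs, hjk, ?_⟩
            intro hjl
            have : j ∈ S :=
              (hmeminter j).2 ⟨hjl, hjs⟩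
            rw [← List.contains_iff_mem] at this
            simp [PySem.Set.contains] at hnc
            exact absurd this (by simpa using hnc)
          · rintro ⟨hjs, hjk, hjl⟩
            simp only [PySem.Set.diff, List.mem_filter, Bool.not_eq_true', decide_eq_true_eq]
            refine ⟨⟨hjs, hjk⟩, ?_⟩
            have : ¬ j ∈ S := by
              intro hx
              exact hjl ((hmeminter j).1 hx).1
            simpa [PySem.Set.contains, List.contains_iff_mem] using this
        have nddown : (PySem.Set.diff (PySem.Set.ofList lia) (S)).Nodup := by
          rw [hofl]; exact ndlia.filter _
        have ndup : (PySem.Set.diff (PySem.Set.ofList (sl.filter (fun i => decide (i < (k : Int)))))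
            (S)).Nodup := by
          rw [hofu]; exact ndupf.filter _
        have huplen : (PySem.Set.diff (PySem.Set.ofList (sl.filter (fun i => decide (i < (k : Int)))))
            (S)).length = pvE z k c := by
          rw [← hElen]
          refine List.Perm.length_eq ?_
          refine (List.perm_ext_iff_of_nodup ndup (pv_nodup_idx (z.take k) _)).2 ?_
          intro j
          rw [hmemup j, hmemEl j, hmemlia j, hmemsl j]
          constructor
          · rintro ⟨⟨n, hn, rfl, hnk, hw⟩, hjk, hnlia⟩
            have hnk' : n < k := by exact_mod_cast hjk
            refine ⟨n, hnk', rfl, hw, ?_⟩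
            intro ha
            exact hnlia ⟨n, by omega, rfl, ha⟩
          · rintro ⟨n, hnk, rfl, hw, ha⟩
            refine ⟨⟨n, by omega, rfl, by omega, hw⟩, by exact_mod_cast hnk, ?_⟩
            rintro ⟨n2, hn2, he, ha2⟩
            have : n2 = n := by exact_mod_cast he.symm
            subst this
            exact ha ha2
        have hdownlen : (PySem.Set.diff (PySem.Set.ofList lia)
              (S)).length + pvG z c
            = al.count c := by
          rw [← hinterlen, ← hliaLen]
          have hdd : PySem.Set.diff (PySem.Set.ofList lia) S
              = lia.filter (fun x => !S.contains x) := by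
            rw [hofl]; rfl
          have hpf : (lia.filter (fun x => (S).contains x)).length
              = (S).length := by
            refine List.Perm.length_eq ?_
            refine (List.perm_ext_iff_of_nodup (ndlia.filter _) ndinter).2 ?_
            intro x
            rw [List.mem_filter]
            constructor
            · rintro ⟨hx1, hx2⟩
              rw [← List.contains_iff_mem]
              simpa [PySem.Set.contains] using hx2
            · intro hx
              refine ⟨((hmeminter x).1 hx).1, ?_⟩
              simpa [PySem.Set.contains, List.contains_iff_mem] using hx
          have hsplit : lia.length
              = (lia.filter (fun x => (S).contains x)).length
              + (lia.filter (fun x => !(S).contains x)).length :=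
            List.length_eq_length_filter_add _
          rw [hdd]
          omega
        have hfinal : (0 < PySem.Set.len (PySem.Set.diff (PySem.Set.ofList lia)
              (S))
            - PySem.Set.len (PySem.Set.diff (PySem.Set.ofList (sl.filter (fun i => decide (i < (k : Int)))))
              (S)))
            ↔ ((pvE z k c : Int) < (al.count c : Int) - pvG z c) := by
          simp only [PySem.Set.len, huplen]
          have hD := hdownlen
          omega
        by_cases hdu : (0 < PySem.Set.len (PySem.Set.diff (PySem.Set.ofList lia)
              (S))
            - PySem.Set.len (PySem.Set.diff (PySem.Set.ofList (sl.filter (fun i => decide (i < (k : Int)))))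
              (S)))
        · have hcond : ((pvE z k c : Int) < (al.count c : Int) - pvG z c) := hfinal.1 hdu
          have hD := hdownlen
          have hU := huplen
          simp [hl, hs, hget, hgreen, hcond]
          omega
        · have hcond : ¬ ((pvE z k c : Int) < (al.count c : Int) - pvG z c) := fun hc => hdu (hfinal.2 hc)
          have hD := hdownlen
          have hU := huplen
          simp [hl, hs, hget, hgreen, hcond]
          omega



lemma pv_portA (word answer : String) (h : word.toList.length ≤ answer.toList.length) :
    return_combinaison word answer
      = (List.range word.toList.length).map (fun k => pvVal answer.toList (word.toList.zip answer.toList) k) := by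
  unfold return_combinaison
  set wl := word.toList with hwl
  set al := answer.toList with hal
  simp only []
  refine Eq.trans (PySem.List.foldl_congr_mem _ _
      (fun (combi : List Int) (p : Int × Char) => combi ++
        [match PySem.List.pyGet? al p.1 with
         | none => 0
         | some ch => pvBodyA wl al p.1 p.2 ch]) []
      (by
        intro acc p hp
        rcases (PySem.List.mem_enumerate_iff _ _ _).1 hp with ⟨k, hk, rfl⟩
        have hget : PySem.List.pyGet? al ((0 : Int) + k) = some (al[k]'(lt_of_lt_of_le hk h)) := by
          rw [show ((0 : Int) + k) = ((k : Nat) : Int) by omega, PySem.List.pyGet?_natCast]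
          exact List.getElem?_eq_getElem (lt_of_lt_of_le hk h)
        simp only [hget, pvBodyA]
        split_ifs <;> rfl)) ?_
  rw [PySem.List.foldl_append_singleton_eq_map, List.nil_append]
  apply List.ext_getElem
  · simp [PySem.List.length_enumerate]
  · intro i h1 h2
    simp only [List.getElem_map, PySem.List.getElem_enumerate, List.getElem_range]
    have hi : i < wl.length := by simpa [PySem.List.length_enumerate] using h1
    have hget : PySem.List.pyGet? al ((0 : Int) + i) = some (al[i]'(lt_of_lt_of_le hi h)) := by
      rw [show ((0 : Int) + i) = ((i : Nat) : Int) by omega, PySem.List.pyGet?_natCast]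
      exact List.getElem?_eq_getElem (lt_of_lt_of_le hi h)
    simp only [hget]
    rw [show ((0 : Int) + i) = ((i : Nat) : Int) by omega]
    exact pv_bodyA_eq wl al h i hi

-- ===== VERDICT (by name: the statement is the Claim_ definition above) =====
theorem return_combinaison_spec : Claim_equal_return_combinaison := by
  intro word answer _ hpre
  unfold Spec_return_combinaison
  rw [pv_portA word answer hpre, pv_portB word answer hpre]
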